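-- pv_equiv track=rewrite | github.com/benbae300/Preflop-Heads-Up-Solver | findWinner.py | compareStraight
-- ===== SOURCE A (Python) =====
-- def isStraight(board):
--     i = 1
--     while i < 5:
--         if board[i] - board[i-1] != 1: return False
--         i += 1
--     return True
--
-- def compareStraight(cardCounter):
--     straightList = list()
--     finalCard = None
--     for val in cardCounter:
--         if cardCounter[val] > 0: straightList.append(val)
--     for idx in range(0, len(straightList) - 4):
--         if isStraight(straightList[idx:idx+5]): finalCard= straightList[idx]
--     return finalCard if finalCard else 5
-- ===== SOURCE B (Python) =====
-- def compareStraight(cardCounter):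
--     # One pass over the items: track the previous kept value and the length of the
--     # current run of consecutive values; a run of >= 5 ends a straight whose low
--     # card is the current value minus 4.
--     run = 1
--     prev = None
--     finalCard = None
--     for val, cnt in cardCounter.items():
--         if cnt <= 0:
--             continue
--         if prev is not None:
--             run = run + 1 if val - prev == 1 else 1
--             if run >= 5:
--                 finalCard = val - 4
--         prev = val
--     return finalCard if finalCard else 5
-- ===== Notes on version B (the rewrite author's own statement) =====
-- stated objective: simpler
-- what changed: Drops the intermediate straightList, the isStraight helper and the window scan that slices and re-checks a 5-card window at every start index, in favour of a single pass over the items that keeps a run length of consecutive kept values and records val-4 whenever the run reaches 5.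
import Mathlib
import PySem

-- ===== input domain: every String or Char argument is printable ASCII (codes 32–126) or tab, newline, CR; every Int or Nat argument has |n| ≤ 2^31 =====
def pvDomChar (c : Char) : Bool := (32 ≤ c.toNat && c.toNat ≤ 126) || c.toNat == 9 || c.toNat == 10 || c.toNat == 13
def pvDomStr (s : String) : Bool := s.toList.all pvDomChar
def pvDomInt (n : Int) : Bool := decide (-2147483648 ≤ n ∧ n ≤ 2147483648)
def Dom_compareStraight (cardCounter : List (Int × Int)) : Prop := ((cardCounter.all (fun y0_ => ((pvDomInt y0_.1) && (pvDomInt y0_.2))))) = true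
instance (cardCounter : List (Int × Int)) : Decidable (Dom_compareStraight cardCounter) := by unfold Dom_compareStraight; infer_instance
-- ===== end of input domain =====

-- B replaces A's window scan (slice + isStraight check at every start index) by a single
-- pass that tracks the run length of consecutive kept values (objective: simpler).

-- ===== PORT A =====
-- while loop of isStraight; indices 1..4 and 0..3 are always in range for the
-- length-5 windows A passes in, so pyGetD is exact here (no IndexError is reachable).
def isStraightLoop (board : List Int) (i : Nat) : Bool :=
  if i < 5 then
    if PySem.List.pyGetD board ((i : Int)) 0 - PySem.List.pyGetD board ((i : Int) - 1) 0 ≠ 1 then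
      false
    else
      isStraightLoop board (i + 1)
  else true
termination_by 5 - i

def isStraight (board : List Int) : Bool := isStraightLoop board 1

-- `cardCounter[val]` is a dict lookup on a key obtained from iterating the dict itself,
-- so the key is always present and getD's default is never used.
def compareStraight (cardCounter : List (Int × Int)) : Int :=
  let straightList : List Int := cardCounter.foldl
    (fun acc p => if 0 < PySem.Dict.getD (PySem.Dict.mk cardCounter) p.1 0 then acc ++ [p.1] else acc) []
  let finalCard : Option Int := (PySem.List.pyRange 0 (PySem.List.len straightList - 4) 1).foldl
    (fun fc idx =>
      if isStraight (PySem.List.slice straightList (some idx) (some (idx + 5))) then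
        some (PySem.List.pyGetD straightList idx 0)
      else fc) none
  match finalCard with
  | some c => if c = 0 then 5 else c
  | none => 5

-- ===== PORT B =====
-- state (run, prev, finalCard), one fold over the items
def compareStraight_alt (cardCounter : List (Int × Int)) : Int :=
  let st : Int × Option Int × Option Int := cardCounter.foldl
    (fun (st : Int × Option Int × Option Int) (p : Int × Int) =>
      if p.2 ≤ 0 then st
      else
        match st.2.1 with
        | none => (st.1, some p.1, st.2.2)
        | some prev =>
          let run := if p.1 - prev = 1 then st.1 + 1 else 1
          (run, some p.1, if 5 ≤ run then some (p.1 - 4) else st.2.2))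
    (1, none, none)
  match st.2.2 with
  | some c => if c = 0 then 5 else c
  | none => 5

-- ===== PRECONDITION & SPEC =====
-- Pre_ excludes association lists with duplicate keys: such a list does not represent a
-- Python dict (dict() would collapse the duplicates), so A's behaviour on it is undefined
-- under the dict-as-association-list convention.
def Pre_compareStraight (cardCounter : List (Int × Int)) : Prop :=
  (cardCounter.map Prod.fst).Nodup

instance (cardCounter : List (Int × Int)) : Decidable (Pre_compareStraight cardCounter) := by
  unfold Pre_compareStraight; infer_instance

def pvWitness_compareStraight : (List (Int × Int)) := [(2, 1), (3, 1), (4, 1), (5, 1), (6, 1)]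

def Spec_compareStraight (cardCounter : List (Int × Int)) (out : Int) : Prop := out = compareStraight_alt cardCounter
instance (cardCounter : List (Int × Int)) (out : Int) : Decidable (Spec_compareStraight cardCounter out) := by unfold Spec_compareStraight; infer_instance

-- ===== CLAIM (what is proved, stated in full; the proofs are below) =====
def Claim_equal_compareStraight : Prop := ∀ (cardCounter : List (Int × Int)), Dom_compareStraight cardCounter → Pre_compareStraight cardCounter → Spec_compareStraight cardCounter (compareStraight cardCounter)

-- ===== LEMMAS AND PROOFS =====

-- the values kept by the first loop, in order
def pvKept (c : List (Int × Int)) : List Int :=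
  (c.filter (fun p => decide (0 < p.2))).map Prod.fst

-- A's second loop as a function of the straight list
def pvFcA (L : List Int) : Option Int :=
  (PySem.List.pyRange 0 (PySem.List.len L - 4) 1).foldl
    (fun fc idx =>
      if isStraight (PySem.List.slice L (some idx) (some (idx + 5))) then
        some (PySem.List.pyGetD L idx 0)
      else fc) none

-- B's per-kept-value step
def pvStep (st : Int × Option Int × Option Int) (v : Int) : Int × Option Int × Option Int :=
  match st.2.1 with
  | none => (st.1, some v, st.2.2)
  | some prev =>
    let run := if v - prev = 1 then st.1 + 1 else 1
    (run, some v, if 5 ≤ run then some (v - 4) else st.2.2)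

-- run length of the consecutive prefix of the REVERSED list
def pvRunR : List Int → Int
  | x :: y :: t => if x - y = 1 then pvRunR (y :: t) + 1 else 1
  | _ => 1

lemma pvRunR_ge_one : ∀ l : List Int, 1 ≤ pvRunR l := by
  intro l
  induction l with
  | nil => simp [pvRunR]
  | cons x t ih =>
    cases t with
    | nil => simp [pvRunR]
    | cons y t' =>
      simp only [pvRunR]
      split_ifs with h
      · have := ih
        omega
      · omega

lemma pvRunR_le_length : ∀ (x : Int) (t : List Int), pvRunR (x :: t) ≤ (x :: t).length := by
  intro x t
  induction t generalizing x with
  | nil => simp [pvRunR]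
  | cons y t' ih =>
    simp only [pvRunR]
    split_ifs with h
    · have := ih y
      simp only [List.length_cons] at *
      omega
    · simp only [List.length_cons]
      omega

lemma pvFcA_short (L : List Int) (h : L.length ≤ 4) : pvFcA L = none := by
  unfold pvFcA
  rw [PySem.List.pyRange_one_eq_nil (by simp [PySem.List.len_eq]; omega)]
  rfl

lemma pvIsStraight_five (a b c d e : Int) :
    (isStraight [a, b, c, d, e] = true) ↔ (b - a = 1 ∧ c - b = 1 ∧ d - c = 1 ∧ e - d = 1) := by
  simp [isStraight, isStraightLoop, PySem.List.pyGetD]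

lemma pvRunR_ge_five_iff (a b c d x : Int) (t : List Int) :
    (5 ≤ pvRunR (x :: d :: c :: b :: a :: t)) ↔
      (b - a = 1 ∧ c - b = 1 ∧ d - c = 1 ∧ x - d = 1) := by
  have h1 := pvRunR_ge_one (a :: t)
  simp only [pvRunR]
  split_ifs with g1 g2 g3 g4 <;> constructor <;> intro h <;> omega

lemma pv_exists_last4 (L : List Int) (h : 4 ≤ L.length) :
    ∃ M a b c d, L = M ++ [a, b, c, d] := by
  have hlen : (L.drop (L.length - 4)).length = 4 := by
    simp [List.length_drop]; omega
  obtain ⟨a, b, c, d, h2⟩ : ∃ a b c d, L.drop (L.length - 4) = [a, b, c, d] := by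
    rcases hdrop : L.drop (L.length - 4) with _ | ⟨a, _ | ⟨b, _ | ⟨c, _ | ⟨d, _ | ⟨e, t⟩⟩⟩⟩⟩ <;>
      rw [hdrop] at hlen <;> simp at hlen
    exact ⟨a, b, c, d, rfl⟩
  refine ⟨L.take (L.length - 4), a, b, c, d, ?_⟩
  rw [← h2, List.take_append_drop]

lemma pv_window_prefix (L : List Int) (x : Int) (k : Nat) (h : k + 5 ≤ L.length) :
    (((L ++ [x]).drop k).take 5) = ((L.drop k).take 5) := by
  rw [List.drop_append_of_le_length (by omega)]
  rw [List.take_append_of_le_length (by simp [List.length_drop]; omega)]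

lemma pvFcA_append (L : List Int) (x : Int) :
    pvFcA (L ++ [x]) =
      if 5 ≤ pvRunR (x :: L.reverse) then some (x - 4) else pvFcA L := by
  by_cases hlen : L.length ≤ 3
  · rw [pvFcA_short (L ++ [x]) (by simp; omega), pvFcA_short L (by omega)]
    have hle : pvRunR (x :: L.reverse) ≤ (x :: L.reverse).length := pvRunR_le_length _ _
    rw [if_neg (by simp at hle; omega)]
  · -- L has at least 4 elements
    have h4 : 4 ≤ L.length := by omega
    obtain ⟨M, a, b, c, d, rfl⟩ := pv_exists_last4 L h4
    have hM : (M ++ [a, b, c, d]).length = M.length + 4 := by simp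
    unfold pvFcA
    have hlen2 : PySem.List.len ((M ++ [a, b, c, d]) ++ [x]) - 4 =
        (PySem.List.len (M ++ [a, b, c, d]) - 4) + 1 := by
      simp [PySem.List.len_eq]; omega
    rw [hlen2, PySem.List.pyRange_one_succ_right (by simp [PySem.List.len_eq])]
    rw [List.foldl_append]
    -- the prefix windows do not see x
    have hpre : (PySem.List.pyRange 0 (PySem.List.len (M ++ [a, b, c, d]) - 4) 1).foldl
        (fun fc idx =>
          if isStraight (PySem.List.slice ((M ++ [a, b, c, d]) ++ [x]) (some idx) (some (idx + 5))) then
            some (PySem.List.pyGetD ((M ++ [a, b, c, d]) ++ [x]) idx 0)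
          else fc) none =
        (PySem.List.pyRange 0 (PySem.List.len (M ++ [a, b, c, d]) - 4) 1).foldl
        (fun fc idx =>
          if isStraight (PySem.List.slice (M ++ [a, b, c, d]) (some idx) (some (idx + 5))) then
            some (PySem.List.pyGetD (M ++ [a, b, c, d]) idx 0)
          else fc) none := by
      apply PySem.List.foldl_congr_mem
      intro acc idx hidx
      rw [PySem.List.mem_pyRange_one] at hidx
      obtain ⟨h0, hlt⟩ := hidx
      simp only [PySem.List.len_eq] at hlt
      have hk : idx = ((idx.toNat : Nat) : Int) := by omega
      have hkb : idx.toNat + 5 ≤ (M ++ [a, b, c, d]).length := by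
        simp only [List.length_append] at *
        simp at hlt ⊢
        omega
      rw [hk]
      rw [show ((idx.toNat : Nat) : Int) + 5 = ((idx.toNat : Nat) : Int) + ((5 : Nat) : Int) by norm_num]
      rw [PySem.List.slice_natCast_add, PySem.List.slice_natCast_add]
      rw [pv_window_prefix _ _ _ hkb]
      rw [PySem.List.pyGetD_natCast, PySem.List.pyGetD_natCast]
      rw [List.getD, List.getD, List.getElem?_append_left (by omega)]
    rw [hpre]
    -- the one new window is the last five elements
    have hrev : ((M ++ [a, b, c, d]).reverse) = d :: c :: b :: a :: M.reverse := by simp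
    rw [hrev]
    simp only [List.foldl_cons, List.foldl_nil]
    have hbnd : PySem.List.len (M ++ [a, b, c, d]) - 4 = ((M.length : Nat) : Int) := by
      simp [PySem.List.len_eq]
    rw [hbnd]
    have hslice : PySem.List.slice ((M ++ [a, b, c, d]) ++ [x])
        (some ((M.length : Nat) : Int)) (some (((M.length : Nat) : Int) + 5)) = [a, b, c, d, x] := by
      rw [show ((M.length : Nat) : Int) + 5 = ((M.length : Nat) : Int) + ((5 : Nat) : Int) by norm_num]
      rw [PySem.List.slice_natCast_add]
      rw [show (M ++ [a, b, c, d]) ++ [x] = M ++ [a, b, c, d, x] by simp]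
      rw [List.drop_append_of_le_length (by omega), List.drop_length]
      simp
    rw [hslice]
    have hget : PySem.List.pyGetD ((M ++ [a, b, c, d]) ++ [x]) ((M.length : Nat) : Int) 0 = a := by
      rw [PySem.List.pyGetD_natCast]
      rw [show (M ++ [a, b, c, d]) ++ [x] = M ++ [a, b, c, d, x] by simp]
      rw [List.getD, List.getElem?_append_right (by omega)]
      simp
    rw [hget]
    by_cases hs : b - a = 1 ∧ c - b = 1 ∧ d - c = 1 ∧ x - d = 1
    · rw [if_pos ((pvIsStraight_five a b c d x).2 hs)]
      rw [if_pos ((pvRunR_ge_five_iff a b c d x M.reverse).2 (by tauto))]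
      have : a = x - 4 := by omega
      rw [this]
    · rw [if_neg (by
        intro hcon
        exact hs ((pvIsStraight_five a b c d x).1 hcon))]
      rw [if_neg (by
        intro hcon
        exact hs (by have := (pvRunR_ge_five_iff a b c d x M.reverse).1 hcon; tauto))]

-- loop invariant of B's pass, stated over the reversed kept list
lemma pvInvariant : ∀ R : List Int,
    R.reverse.foldl pvStep (1, none, none) = (pvRunR R, R.head?, pvFcA R.reverse) := by
  intro R
  induction R with
  | nil =>
    simp only [List.reverse_nil]
    rw [pvFcA_short [] (by simp)]
    rfl
  | cons x R' ih =>
    rw [List.reverse_cons, List.foldl_append, ih, List.foldl_cons, List.foldl_nil]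
    rw [pvFcA_append R'.reverse x, List.reverse_reverse]
    cases R' with
    | nil =>
      rw [pvFcA_short [].reverse (by simp)]
      simp [pvStep, pvRunR]
    | cons y R'' =>
      have hrr : pvRunR (x :: y :: R'') = if x - y = 1 then pvRunR (y :: R'') + 1 else 1 := rfl
      rw [hrr]
      simp only [pvStep, List.head?]

-- B's fold over the items (the lambda is port B's) equals the pvStep fold over the kept values
lemma pvFoldB : ∀ (l : List (Int × Int)) (st : Int × Option Int × Option Int),
    l.foldl
      (fun (st : Int × Option Int × Option Int) (p : Int × Int) =>
        if p.2 ≤ 0 then st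
        else
          match st.2.1 with
          | none => (st.1, some p.1, st.2.2)
          | some prev =>
            let run := if p.1 - prev = 1 then st.1 + 1 else 1
            (run, some p.1, if 5 ≤ run then some (p.1 - 4) else st.2.2)) st =
      (pvKept l).foldl pvStep st := by
  intro l
  induction l with
  | nil => intro st; rfl
  | cons p l' ih =>
    intro st
    rw [List.foldl_cons]
    by_cases h : p.2 ≤ 0
    · rw [if_pos h, ih]
      simp [pvKept, show ¬ (0 < p.2) by omega]
    · rw [if_neg h, ih]
      have hK : pvKept (p :: l') = p.1 :: pvKept l' := by
        simp [pvKept, show (0 < p.2) by omega]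
      rw [hK, List.foldl_cons]
      rfl

-- A's first loop builds exactly the kept values (needs distinct keys)
lemma pvFoldA (c : List (Int × Int)) (hnd : Pre_compareStraight c) :
    c.foldl (fun acc p =>
      if 0 < PySem.Dict.getD (PySem.Dict.mk c) p.1 0 then acc ++ [p.1] else acc) [] = pvKept c := by
  rw [PySem.List.foldl_congr_mem c _
    (fun acc p => if (fun q : Int × Int => decide (0 < q.2)) p = true then acc ++ [Prod.fst p] else acc) []
    (by
      intro acc p hp
      have hitems : (p.1, p.2) ∈ (PySem.Dict.mk c).items := by simpa using hp
      have hkeys : (PySem.Dict.mk c).keys.Nodup := by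
        simpa [PySem.Dict.keys, Pre_compareStraight] using hnd
      rw [PySem.Dict.getD_of_mem_items _ hitems hkeys 0]
      simp)]
  rw [PySem.List.foldl_append_if]
  simp [pvKept]

theorem pv_main : ∀ (c : List (Int × Int)), Pre_compareStraight c →
    compareStraight c = compareStraight_alt c := by
  intro c hpre
  have key : pvFcA (pvKept c) = ((pvKept c).foldl pvStep (1, none, none)).2.2 := by
    have hinv := pvInvariant (pvKept c).reverse
    rw [List.reverse_reverse] at hinv
    rw [hinv]
  simp only [compareStraight, compareStraight_alt]
  rw [pvFoldA c hpre, pvFoldB c]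
  rw [← key]
  rfl

-- ===== VERDICT (by name: the statement is the Claim_ definition above) =====
theorem compareStraight_spec : Claim_equal_compareStraight := by
  intro c _ hpre
  unfold Spec_compareStraight
  exact pv_main c hpre
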